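-- pv_equiv track=rewrite | github.com/kabachok-vpanike/BPEedition | clusterization.py | select_top_two_genres
-- ===== SOURCE A (Python) =====
-- def select_top_two_genres(artist_to_genre, stat):
--     artist_top_genres = {}
--
--     for artist, genres in artist_to_genre.items():
--         top_genres = []
--         for genre in genres:
--             if genre in stat:
--                 top_genres.append((genre, stat[genre]))
--         top_genres.sort(key=lambda x: x[1], reverse=True)
--         artist_top_genres[artist] = top_genres[:1]
--     return artist_top_genres
-- ===== SOURCE B (Python) =====
-- def select_top_two_genres(artist_to_genre, stat):
--     def best(genres):
--         pairs = [(g, stat[g]) for g in genres if g in stat]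
--         return [max(pairs, key=lambda x: x[1])] if pairs else []
--     return {artist: best(genres) for artist, genres in artist_to_genre.items()}
-- ===== Notes on version B (the rewrite author's own statement) =====
-- stated objective: simpler
-- what changed: Replaces per-artist append-loop, stable reverse sort and [:1] slice with a dict comprehension: a filtered list comprehension of (genre, stat[genre]) pairs and a single max(key=...) scan (first maximum matches the stable reverse-sort's head), no sort and no mutation.
import Mathlib
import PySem

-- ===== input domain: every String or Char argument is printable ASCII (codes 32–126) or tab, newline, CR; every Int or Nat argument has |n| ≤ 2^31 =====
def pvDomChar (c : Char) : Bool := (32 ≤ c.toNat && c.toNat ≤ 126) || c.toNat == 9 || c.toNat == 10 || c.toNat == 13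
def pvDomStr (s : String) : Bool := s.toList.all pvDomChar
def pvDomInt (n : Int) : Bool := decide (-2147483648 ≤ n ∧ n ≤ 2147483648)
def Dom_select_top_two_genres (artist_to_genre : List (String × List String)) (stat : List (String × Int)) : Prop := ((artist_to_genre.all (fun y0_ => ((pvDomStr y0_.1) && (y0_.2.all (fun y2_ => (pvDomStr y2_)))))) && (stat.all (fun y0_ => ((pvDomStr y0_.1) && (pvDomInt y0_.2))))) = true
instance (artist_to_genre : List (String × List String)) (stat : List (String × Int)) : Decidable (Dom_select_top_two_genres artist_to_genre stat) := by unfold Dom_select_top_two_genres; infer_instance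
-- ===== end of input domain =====

-- B replaces A's per-artist append-loop / stable-reverse-sort / [:1] slice and the outer
-- insert-into-dict loop with a dict comprehension over filtered pairs and a single max(key=...)
-- scan; objective: simpler (no sort, no mutation).

-- ===== PORT A =====
-- A's inner filter loop: top_genres.append((genre, stat[genre])) when genre in stat
def pvFiltStep (statd : PySem.Dict String Int) (tg : List (String × Int)) (g : String) : List (String × Int) :=
  if statd.contains g then tg ++ [(g, statd.getD g 0)] else tg

-- A's per-artist value: sort the filtered list by x[1] descending (stable), take [:1]
def pvTopA (statd : PySem.Dict String Int) (gs : List String) : List (String × Int) :=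
  PySem.List.slice (PySem.List.sorted (gs.foldl (pvFiltStep statd) []) (fun x => x.2) true) none (some 1)

def select_top_two_genres (artist_to_genre : List (String × List String)) (stat : List (String × Int)) : List (String × List (String × Int)) :=
  ((PySem.Dict.ofList artist_to_genre).items.foldl
    (fun acc p => acc.insert p.1 (pvTopA (PySem.Dict.ofList stat) p.2))
    PySem.Dict.empty).items

-- ===== PORT B =====
-- B's best(genres): list comprehension of the pairs present in stat, then max(key=x[1]) if nonempty
def pvBest (statd : PySem.Dict String Int) (gs : List String) : List (String × Int) :=
  let pairs := gs.filterMap (fun g => (statd.get? g).map (fun v => (g, v)))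
  if pairs = [] then []
  else
    match PySem.List.max? pairs (fun x => x.2) with
    | some b => [b]
    | none => []

-- B's dict comprehension iterates the distinct keys of artist_to_genre, so each insertion is a
-- fresh key and appends: ported exactly as a map over the dict's items
def select_top_two_genres_alt (artist_to_genre : List (String × List String)) (stat : List (String × Int)) : List (String × List (String × Int)) :=
  (PySem.Dict.ofList artist_to_genre).items.map
    (fun p => (p.1, pvBest (PySem.Dict.ofList stat) p.2))

-- ===== PRECONDITION & SPEC =====
def Spec_select_top_two_genres (artist_to_genre : List (String × List String)) (stat : List (String × Int)) (out : List (String × List (String × Int))) : Prop := out = select_top_two_genres_alt artist_to_genre stat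
instance (artist_to_genre : List (String × List String)) (stat : List (String × Int)) (out : List (String × List (String × Int))) : Decidable (Spec_select_top_two_genres artist_to_genre stat out) := by unfold Spec_select_top_two_genres; infer_instance

-- ===== CLAIM =====
def Claim_equal_select_top_two_genres : Prop := ∀ (artist_to_genre : List (String × List String)) (stat : List (String × Int)), Dom_select_top_two_genres artist_to_genre stat → Spec_select_top_two_genres artist_to_genre stat (select_top_two_genres artist_to_genre stat)

-- ===== LEMMAS AND PROOFS =====

-- the filter that both inner passes apply to each genre
def pvFilt (statd : PySem.Dict String Int) (g : String) : Option (String × Int) :=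
  (statd.get? g).map (fun v => (g, v))

-- the running-first-max step (the step of PySem.List.max? at key x.2)
def pvMaxStep (o : Option (String × Int)) (x : String × Int) : Option (String × Int) :=
  match o with
  | none => some x
  | some m => if m.2 < x.2 then some x else some m

theorem pvFiltStep_foldl (statd : PySem.Dict String Int) :
    ∀ (gs : List String) (acc : List (String × Int)),
      gs.foldl (pvFiltStep statd) acc = acc ++ gs.filterMap (pvFilt statd) := by
  intro gs
  induction gs with
  | nil => intro acc; simp
  | cons g t ih =>
    intro acc
    simp only [List.foldl_cons, List.filterMap_cons, ih]
    unfold pvFiltStep pvFilt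
    rw [PySem.Dict.contains_eq_isSome_get?, PySem.Dict.getD]
    cases h : statd.get? g with
    | none => simp
    | some v => simp

theorem pvMax?_eq_foldl (xs : List (String × Int)) :
    PySem.List.max? xs (fun x => x.2) = xs.foldl pvMaxStep none := by
  unfold PySem.List.max?
  congr 1
  funext o x
  cases o <;> rfl

theorem pvInsertBy_head? (x : String × Int) (acc : List (String × Int)) :
    (PySem.List.insertBy (fun a b => decide (b.2 < a.2)) x acc).head? = pvMaxStep acc.head? x := by
  cases acc with
  | nil => rfl
  | cons m t =>
    unfold PySem.List.insertBy pvMaxStep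
    by_cases h : m.2 < x.2 <;> simp [h]

theorem pvSortedRev_head? :
    ∀ (xs : List (String × Int)) (acc : List (String × Int)),
      (xs.foldl (fun acc x => PySem.List.insertBy (fun a b => decide (b.2 < a.2)) x acc) acc).head?
        = xs.foldl pvMaxStep acc.head? := by
  intro xs
  induction xs with
  | nil => intro acc; rfl
  | cons x t ih =>
    intro acc
    simp only [List.foldl_cons, ih, pvInsertBy_head?]

theorem pvTake1_eq_head? (l : List (String × Int)) :
    PySem.List.slice l none (some 1) = (match l.head? with | none => ([] : List (String × Int)) | some b => [b]) := by
  rw [show (1 : Int) = ((1 : Nat) : Int) from rfl, PySem.List.slice_to_natCast]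
  cases l <;> rfl

theorem pvTop_eq (statd : PySem.Dict String Int) (gs : List String) :
    pvTopA statd gs = pvBest statd gs := by
  have hs : ∀ (l : List (String × Int)) (m : String × Int),
      l.foldl pvMaxStep (some m) ≠ none := by
    intro l
    induction l with
    | nil => intro m; simp
    | cons y ys ih =>
      intro m
      simp only [List.foldl_cons]
      have hstep : pvMaxStep (some m) y = some (if m.2 < y.2 then y else m) := by
        show (if m.2 < y.2 then some y else some m) = _
        split_ifs <;> rfl
      rw [hstep]
      exact ih _
  have hcanon : ∀ (l : List (String × Int)),
      (match l.foldl pvMaxStep none with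
        | none => ([] : List (String × Int)) | some b => [b])
      = (if l = [] then []
         else match PySem.List.max? l (fun x => x.2) with
              | some b => [b] | none => []) := by
    intro l
    cases l with
    | nil => rfl
    | cons x t =>
      rw [pvMax?_eq_foldl]
      simp only [List.foldl_cons, reduceCtorEq, if_false]
      have h1 : pvMaxStep none x = some x := rfl
      rw [h1]
      cases hr : t.foldl pvMaxStep (some x) with
      | none => exact absurd hr (hs t x)
      | some b => simp
  have hA : pvTopA statd gs
      = (match (gs.filterMap (pvFilt statd)).foldl pvMaxStep none with
          | none => ([] : List (String × Int)) | some b => [b]) := by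
    unfold pvTopA
    rw [PySem.List.sorted_rev_eq_foldl_insertBy, pvTake1_eq_head?, pvSortedRev_head?,
      pvFiltStep_foldl]
    simp
  have hp : gs.filterMap (fun g => (statd.get? g).map (fun v => (g, v)))
      = gs.filterMap (pvFilt statd) := rfl
  rw [hA, hcanon]
  unfold pvBest
  rw [hp]

-- ===== VERDICT =====
theorem select_top_two_genres_spec : Claim_equal_select_top_two_genres := by
  intro artist_to_genre stat _
  unfold Spec_select_top_two_genres select_top_two_genres select_top_two_genres_alt
  have hnd : (((PySem.Dict.ofList artist_to_genre).items).map (fun p => p.1)).Nodup := by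
    simpa [PySem.Dict.keys] using PySem.Dict.nodup_keys_ofList artist_to_genre
  rw [PySem.Dict.items_foldl_insert_fresh
      ((PySem.Dict.ofList artist_to_genre).items)
      (fun p => p.1)
      (fun p => pvTopA (PySem.Dict.ofList stat) p.2)
      PySem.Dict.empty
      (fun a _ => PySem.Dict.contains_empty a.1)
      hnd]
  simp only [PySem.Dict.items, PySem.Dict.empty, List.nil_append]
  exact List.map_congr_left (fun p _ => by rw [pvTop_eq])
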